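-- pv_equiv track=rewrite | github.com/DS-567/AMD-AOHW25_620 | Demonstrator/sw/Python_GUI/ISCAS_demo_gui.py | swap_IR_opcode_in_features
-- ===== SOURCE A (Python) =====
-- def swap_IR_opcode_in_features(features_int):
--     # lower 7 bits
--     IR_opcode = features_int & 0b1111111
--
--     # Reverse the lower 7 bits manually
--     swapped_bits = 0
--     for i in range(7):
--         if (IR_opcode & (1 << i)) != 0:  # Check if the i-th bit is set
--             swapped_bits |= (1 << (6 - i))  # Set the corresponding reversed bit
--
--     # Clear the lower 7 bits in the original number and insert the swapped bits
--     result = (features_int & ~0b1111111) | swapped_bits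
--
--     # Convert the result to a 16-bit binary string
--     return f"{result:016b}"
-- ===== SOURCE B (Python) =====
-- def swap_IR_opcode_in_features(features_int):
--     # Bit reversal via a zero-padded binary-string round-trip instead of the shift/test/set loop.
--     s = f"{features_int & 0b1111111:07b}"
--     swapped_bits = int(s[::-1], 2)
--     return f"{(features_int & ~0b1111111) | swapped_bits:016b}"
-- ===== Notes on version B (the rewrite author's own statement) =====
-- stated objective: simpler
-- what changed: Replaces the explicit 7-iteration shift/test/set bit loop with a zero-padded binary-string round-trip: format the 7-bit opcode as '07b', reverse the string with slicing, and parse it back with int(s, 2).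
import Mathlib
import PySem

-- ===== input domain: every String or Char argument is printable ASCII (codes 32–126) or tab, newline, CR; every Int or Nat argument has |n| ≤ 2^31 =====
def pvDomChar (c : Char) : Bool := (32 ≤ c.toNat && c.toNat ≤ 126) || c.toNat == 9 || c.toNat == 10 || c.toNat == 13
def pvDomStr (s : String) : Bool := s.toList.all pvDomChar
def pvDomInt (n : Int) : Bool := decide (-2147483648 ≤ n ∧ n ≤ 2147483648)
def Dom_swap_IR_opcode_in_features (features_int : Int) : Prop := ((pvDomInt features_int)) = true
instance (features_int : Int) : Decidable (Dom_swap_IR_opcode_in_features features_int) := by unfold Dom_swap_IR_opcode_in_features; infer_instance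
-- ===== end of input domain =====

-- B replaces A's shift/test/set bit loop by a zero-padded binary-string round-trip (format, reverse, parse); objective: simpler.

-- Shared formatting helper: Python's f"{r:0{w}b}" (sign, then zero padding to total width w, then binary digits).
-- fuel-structured so the kernel can evaluate it (fuel = n suffices since n/2 < n)
def pvBinDigitsAux : Nat → Nat → List Char
  | _, 0 => []
  | 0, _+1 => []
  | fuel+1, n+1 => pvBinDigitsAux fuel ((n+1)/2) ++ [if (n+1) % 2 = 1 then '1' else '0']

def pvBinDigits (n : Nat) : List Char := pvBinDigitsAux n n

def pvFmtB (r : Int) (w : Nat) : String :=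
  let d := if r.natAbs = 0 then ['0'] else pvBinDigits r.natAbs
  let body := List.replicate ((if r < 0 then w - 1 else w) - d.length) '0' ++ d
  String.ofList (if r < 0 then '-' :: body else body)

-- ===== PORT A =====
-- A's explicit bit-reversal loop: for i in range(7): if bit i set, set bit 6-i.
def pvSwapLoop (IR_opcode : Int) : Int :=
  (List.range 7).foldl
    (fun swapped_bits i =>
      if PySem.Int.band IR_opcode ((1:Int) <<< i) ≠ 0 then
        PySem.Int.bor swapped_bits ((1:Int) <<< (6 - i))
      else swapped_bits) 0

def swap_IR_opcode_in_features (features_int : Int) : String :=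
  let IR_opcode := PySem.Int.band features_int 127
  let swapped_bits := pvSwapLoop IR_opcode
  let result := PySem.Int.bor (PySem.Int.band features_int (Int.not 127)) swapped_bits
  pvFmtB result 16

-- ===== PORT B =====
-- int(t, 2) for a string of '0'/'1' digits
def pvParseBin2 (s : String) : Int :=
  s.toList.foldl (fun acc c => 2 * acc + (if c = '1' then (1:Int) else 0)) 0

def swap_IR_opcode_in_features_alt (features_int : Int) : String :=
  let s := pvFmtB (PySem.Int.band features_int 127) 7
  let swapped_bits := pvParseBin2 (String.ofList s.toList.reverse)
  pvFmtB (PySem.Int.bor (PySem.Int.band features_int (Int.not 127)) swapped_bits) 16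

-- ===== PRECONDITION & SPEC =====
def Spec_swap_IR_opcode_in_features (features_int : Int) (out : String) : Prop := out = swap_IR_opcode_in_features_alt features_int
instance (features_int : Int) (out : String) : Decidable (Spec_swap_IR_opcode_in_features features_int out) := by unfold Spec_swap_IR_opcode_in_features; infer_instance

-- ===== CLAIM (what is proved, stated in full; the proofs are below) =====
def Claim_equal_swap_IR_opcode_in_features : Prop := ∀ (features_int : Int), Dom_swap_IR_opcode_in_features features_int → Spec_swap_IR_opcode_in_features features_int (swap_IR_opcode_in_features features_int)

-- ===== LEMMAS AND PROOFS =====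

theorem band127_eq_mod (n : Int) : PySem.Int.band n 127 = n % 128 := by
  unfold PySem.Int.band
  have e : (Int.toNat 127) = 127 := rfl
  cases n with
  | ofNat m =>
      have h : m &&& 127 = m % 128 := by
        have := Nat.and_two_pow_sub_one_eq_mod m 7; norm_num at this; omega
      simp only [show ((Int.ofNat m).toNat = m) from rfl]
      norm_num [e, h]
  | negSucc m =>
      have h : m &&& 127 = m % 128 := by
        have := Nat.and_two_pow_sub_one_eq_mod m 7; norm_num at this; omega
      norm_num [e, Nat.and_comm 127 m, h]
      omega

set_option maxRecDepth 8192 in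
theorem swapped_key : ∀ k : Fin 128,
    pvSwapLoop (k : Int) = pvParseBin2 (String.ofList (pvFmtB (k : Int) 7).toList.reverse) := by
  decide

theorem swapped_eq (m : Int) (h0 : 0 ≤ m) (h1 : m < 128) :
    pvSwapLoop m = pvParseBin2 (String.ofList (pvFmtB m 7).toList.reverse) := by
  have hk : m = ((⟨m.toNat, by omega⟩ : Fin 128) : Int) := by simp; omega
  rw [hk]; exact swapped_key _

theorem swap_IR_opcode_in_features_spec : Claim_equal_swap_IR_opcode_in_features := by
  intro n _
  unfold Spec_swap_IR_opcode_in_features swap_IR_opcode_in_features swap_IR_opcode_in_features_alt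
  have hb := band127_eq_mod n
  have hs := swapped_eq (PySem.Int.band n 127)
    (by rw [hb]; exact Int.emod_nonneg n (by norm_num))
    (by rw [hb]; exact Int.emod_lt_of_pos n (by norm_num))
  show pvFmtB (PySem.Int.bor (PySem.Int.band n (Int.not 127)) (pvSwapLoop (PySem.Int.band n 127))) 16
      = pvFmtB (PySem.Int.bor (PySem.Int.band n (Int.not 127))
          (pvParseBin2 (String.ofList (pvFmtB (PySem.Int.band n 127) 7).toList.reverse))) 16
  rw [hs]
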